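-- pv_equiv track=rewrite | github.com/Nikhith06/072_AI_LAB | CS072-Week-5-simulated-annealing.py | queens_max
-- ===== SOURCE A (Python) =====
-- def queens_max(position):
--     queen_not_attacking = 0
--
--     # Compare each pair of queens to check if they are attacking each other
--     for i in range(len(position) - 1):
--         no_attack_on_j = 0
--         for j in range(i + 1, len(position)):
--             # Check for no horizontal or diagonal attacks
--             if (position[j] != position[i]) and (position[j] != position[i] + (j - i)) and (position[j] != position[i] - (j - i)):
--                 no_attack_on_j += 1
--                 if no_attack_on_j == len(position) - 1 - i:
--                     queen_not_attacking += 1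
--
--     # Add 1 if all queens are not attacking each other, meaning we solved the problem
--     if queen_not_attacking == len(position) - 1:
--         queen_not_attacking += 1
--     return queen_not_attacking
-- ===== SOURCE B (Python) =====
-- def queens_max(position):
--     # One right-to-left pass: hash sets of rows and both diagonals of the queens
--     # already seen (those with larger index) replace A's inner scan.
--     n = len(position)
--     rows, diag_down, diag_up = set(), set(), set()
--     safe = 0
--     for i in range(n - 1, -1, -1):
--         p = position[i]
--         if i != n - 1 and p not in rows and p - i not in diag_down and p + i not in diag_up:
--             safe += 1
--         rows.add(p)
--         diag_down.add(p - i)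
--         diag_up.add(p + i)
--     return safe + 1 if safe == n - 1 else safe
-- ===== Notes on version B (the rewrite author's own statement) =====
-- stated objective: faster
-- what changed: Replaced the O(n^2) pairwise inner scan with a single right-to-left pass maintaining hash sets of rows and both diagonals of the already-seen later queens.
import Mathlib
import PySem

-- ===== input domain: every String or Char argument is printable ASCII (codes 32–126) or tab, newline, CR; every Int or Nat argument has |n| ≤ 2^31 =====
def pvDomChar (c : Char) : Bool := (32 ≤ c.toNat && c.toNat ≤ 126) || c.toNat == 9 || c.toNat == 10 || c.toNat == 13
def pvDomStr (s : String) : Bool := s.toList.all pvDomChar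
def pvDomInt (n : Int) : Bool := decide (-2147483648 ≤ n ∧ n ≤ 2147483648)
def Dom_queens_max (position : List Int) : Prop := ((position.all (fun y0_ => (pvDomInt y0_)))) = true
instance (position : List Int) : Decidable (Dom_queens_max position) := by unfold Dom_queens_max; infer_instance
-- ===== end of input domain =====

-- B replaces A's O(n^2) pairwise scan by one right-to-left pass with sets of rows and both diagonals (asymptotically faster).

-- ===== PORT A =====
-- inner-loop body of A: state (no_attack_on_j, queen_not_attacking)
def stepA (position : List Int) (n i : Int) (st : Int × Int) (j : Int) : Int × Int :=
  if PySem.List.pyGetD position j 0 ≠ PySem.List.pyGetD position i 0 ∧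
     PySem.List.pyGetD position j 0 ≠ PySem.List.pyGetD position i 0 + (j - i) ∧
     PySem.List.pyGetD position j 0 ≠ PySem.List.pyGetD position i 0 - (j - i) then
    if st.1 + 1 = n - 1 - i then (st.1 + 1, st.2 + 1) else (st.1 + 1, st.2)
  else st

-- one iteration of A's outer loop: run the j-loop with no_attack_on_j = 0
def innerA (position : List Int) (n i q : Int) : Int :=
  ((PySem.List.pyRange (i + 1) n 1).foldl (stepA position n i) (0, q)).2

def queens_max (position : List Int) : Int :=
  let n : Int := position.length
  let q := (PySem.List.pyRange 0 (n - 1) 1).foldl (fun q i => innerA position n i q) 0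
  if q = n - 1 then q + 1 else q

-- ===== PORT B =====
-- loop body of B: state (rows, diag_down, diag_up, safe), i runs from n-1 down to 0
def stepB (position : List Int) (n : Int)
    (st : PySem.Set Int × PySem.Set Int × PySem.Set Int × Int) (i : Int) :
    PySem.Set Int × PySem.Set Int × PySem.Set Int × Int :=
  let p := PySem.List.pyGetD position i 0
  let safe := if i ≠ n - 1 ∧ p ∉ st.1 ∧ (p - i) ∉ st.2.1 ∧ (p + i) ∉ st.2.2.1
              then st.2.2.2 + 1 else st.2.2.2
  (PySem.Set.add st.1 p, PySem.Set.add st.2.1 (p - i), PySem.Set.add st.2.2.1 (p + i), safe)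

def queens_max_alt (position : List Int) : Int :=
  let n : Int := position.length
  let st := (PySem.List.pyRange (n - 1) (-1) (-1)).foldl (stepB position n)
    (PySem.Set.empty, PySem.Set.empty, PySem.Set.empty, 0)
  if st.2.2.2 = n - 1 then st.2.2.2 + 1 else st.2.2.2

-- ===== PRECONDITION & SPEC =====
def Spec_queens_max (position : List Int) (out : Int) : Prop := out = queens_max_alt position
instance (position : List Int) (out : Int) : Decidable (Spec_queens_max position out) := by unfold Spec_queens_max; infer_instance

-- ===== CLAIM (what is proved, stated in full; the proofs are below) =====
def Claim_equal_queens_max : Prop := ∀ (position : List Int), Dom_queens_max position → Spec_queens_max position (queens_max position)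

-- ===== LEMMAS AND PROOFS =====

-- pos[j] (total form; every index used is in range)
def pg (pos : List Int) (j : Int) : Int := PySem.List.pyGetD pos j 0

-- queen j does not attack queen i (Bool form of A's test)
def okB (pos : List Int) (i j : Int) : Bool :=
  decide (pg pos j ≠ pg pos i ∧ pg pos j ≠ pg pos i + (j - i) ∧ pg pos j ≠ pg pos i - (j - i))

-- number of j in [i+1, m) not attacking i
def cnt (pos : List Int) (i m : Int) : Int :=
  ((PySem.List.pyRange (i + 1) m 1).countP (okB pos i) : Int)

-- queen i is safe from all later queens
def allOk (pos : List Int) (n : Int) (i : Int) : Bool := decide (cnt pos i n = n - 1 - i)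

theorem cnt_succ (pos : List Int) (i m : Int) (h : i + 1 ≤ m) :
    cnt pos i (m + 1) = cnt pos i m + (if okB pos i m then 1 else 0) := by
  unfold cnt
  rw [PySem.List.pyRange_one_succ_right h, List.countP_append]
  simp [List.countP_singleton]

theorem allOk_iff (pos : List Int) (n i : Int) (h : i < n) :
    allOk pos n i = true ↔ ∀ j, i < j → j < n → okB pos i j = true := by
  unfold allOk cnt
  rw [decide_eq_true_eq]
  have hl : (PySem.List.pyRange (i+1) n 1).length = (n - (i+1)).toNat := PySem.List.length_pyRange_one _ _
  constructor
  · intro hc j hj1 hj2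
    have hall : (PySem.List.pyRange (i+1) n 1).countP (okB pos i) = (PySem.List.pyRange (i+1) n 1).length := by omega
    have := (List.countP_eq_length).1 hall
    exact this j (by rw [PySem.List.mem_pyRange_one]; omega)
  · intro hall
    have : (PySem.List.pyRange (i+1) n 1).countP (okB pos i) = (PySem.List.pyRange (i+1) n 1).length := by
      apply List.countP_eq_length.2
      intro j hj
      rw [PySem.List.mem_pyRange_one] at hj
      exact hall j (by omega) hj.2
    omega

theorem innerA_loop (pos : List Int) (n i : Int) :
    ∀ (k : Nat) (m c q : Int), (n - m).toNat = k → i + 1 ≤ m → m < n →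
    c = cnt pos i m → c ≤ m - i - 1 →
    ((PySem.List.pyRange m n 1).foldl (stepA pos n i) (c, q)).2 =
      q + (if allOk pos n i then 1 else 0) := by
  intro k
  induction k with
  | zero => intro m c q hk h1 h2 hc hb; omega
  | succ k ih =>
    intro m c q hk h1 h2 hc hb
    rw [PySem.List.pyRange_one_cons h2, List.foldl_cons]
    by_cases hok : okB pos i m = true
    · have hprop : PySem.List.pyGetD pos m 0 ≠ PySem.List.pyGetD pos i 0 ∧
          PySem.List.pyGetD pos m 0 ≠ PySem.List.pyGetD pos i 0 + (m - i) ∧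
          PySem.List.pyGetD pos m 0 ≠ PySem.List.pyGetD pos i 0 - (m - i) := by
        simpa [okB, pg] using hok
      have hcnt : cnt pos i (m + 1) = cnt pos i m + 1 := by
        rw [cnt_succ pos i m h1, hok]; simp
      by_cases hbump : c + 1 = n - 1 - i
      · have hm : m = n - 1 := by omega
        have hstep : stepA pos n i (c, q) m = (c + 1, q + 1) := by
          simp [stepA, hprop, hbump]
        rw [hstep, PySem.List.pyRange_one_eq_nil (by omega : n ≤ m + 1)]
        have hEq : cnt pos i n = cnt pos i (m + 1) := by rw [show n = m + 1 by omega]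
        have hall : allOk pos n i = true := by
          unfold allOk
          rw [decide_eq_true_eq]
          omega
        rw [hall]
        simp
      · have hstep : stepA pos n i (c, q) m = (c + 1, q) := by
          simp [stepA, hprop, hbump]
        rw [hstep]
        by_cases hmn : m + 1 < n
        · exact ih (m + 1) (c + 1) q (by omega) (by omega) hmn (by omega) (by omega)
        · rw [PySem.List.pyRange_one_eq_nil (by omega : n ≤ m + 1)]
          have hEq : cnt pos i n = cnt pos i (m + 1) := by rw [show n = m + 1 by omega]
          have hall : allOk pos n i = false := by
            unfold allOk
            rw [decide_eq_false_iff_not]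
            omega
          rw [hall]
          simp
    · have hprop : ¬(PySem.List.pyGetD pos m 0 ≠ PySem.List.pyGetD pos i 0 ∧
          PySem.List.pyGetD pos m 0 ≠ PySem.List.pyGetD pos i 0 + (m - i) ∧
          PySem.List.pyGetD pos m 0 ≠ PySem.List.pyGetD pos i 0 - (m - i)) := by
        intro hcon
        exact hok (by simp only [okB, pg]; exact decide_eq_true hcon)
      rw [Bool.not_eq_true] at hok
      have hcnt : cnt pos i (m + 1) = cnt pos i m := by
        rw [cnt_succ pos i m h1, hok]; simp
      have hstep : stepA pos n i (c, q) m = (c, q) := by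
        simp [stepA, hprop]
      rw [hstep]
      by_cases hmn : m + 1 < n
      · exact ih (m + 1) c q (by omega) (by omega) hmn (by omega) (by omega)
      · rw [PySem.List.pyRange_one_eq_nil (by omega : n ≤ m + 1)]
        have hEq : cnt pos i n = cnt pos i (m + 1) := by rw [show n = m + 1 by omega]
        have hall : allOk pos n i = false := by
          unfold allOk
          rw [decide_eq_false_iff_not]
          omega
        rw [hall]
        simp

theorem innerA_eq (pos : List Int) (n i q : Int) (h : i < n - 1) :
    innerA pos n i q = q + (if allOk pos n i then 1 else 0) := by
  unfold innerA
  apply innerA_loop pos n i (n - (i + 1)).toNat (i + 1) 0 q rfl (le_refl _) (by omega)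
  · simp [cnt, PySem.List.pyRange_one_eq_nil (le_refl (i + 1))]
  · omega

theorem outerA (pos : List Int) (n : Int) :
    ∀ (l : List Int) (q0 : Int), (∀ i ∈ l, i < n - 1) →
    l.foldl (fun q i => innerA pos n i q) q0 = q0 + (l.countP (allOk pos n) : Int) := by
  intro l
  induction l with
  | nil => intro q0 _; simp
  | cons i l ih =>
    intro q0 hl
    rw [List.foldl_cons]
    rw [ih _ (fun j hj => hl j (List.mem_cons_of_mem _ hj))]
    rw [innerA_eq pos n i q0 (hl i (List.mem_cons_self))]
    rw [List.countP_cons]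
    by_cases hc : allOk pos n i = true <;> simp [hc] <;> ring

theorem loopB (pos : List Int) (n : Int) :
    ∀ (k : Nat) (m : Int) (rows d1 d2 : PySem.Set Int) (safe : Int),
    (m + 1).toNat = k → -1 ≤ m → m ≤ n - 1 →
    (∀ p, p ∈ rows ↔ ∃ j, m < j ∧ j < n ∧ pg pos j = p) →
    (∀ p, p ∈ d1 ↔ ∃ j, m < j ∧ j < n ∧ pg pos j - j = p) →
    (∀ p, p ∈ d2 ↔ ∃ j, m < j ∧ j < n ∧ pg pos j + j = p) →
    safe = ((PySem.List.pyRange (m + 1) (n - 1) 1).countP (allOk pos n) : Int) →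
    ((PySem.List.pyRange m (-1) (-1)).foldl (stepB pos n) (rows, d1, d2, safe)).2.2.2 =
      ((PySem.List.pyRange 0 (n - 1) 1).countP (allOk pos n) : Int) := by
  intro k
  induction k with
  | zero =>
    intro m rows d1 d2 safe hk hm1 hm2 hr hd1 hd2 hsafe
    have hm : m = -1 := by omega
    subst hm
    rw [PySem.List.pyRange_neg_one_eq_nil (le_refl (-1))]
    norm_num at hsafe
    simpa using hsafe
  | succ k ih =>
    intro m rows d1 d2 safe hk hm1 hm2 hr hd1 hd2 hsafe
    have hm0 : 0 ≤ m := by omega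
    have hmn' : m < n := by omega
    rw [PySem.List.pyRange_neg_one_cons (by omega : (-1:Int) < m), List.foldl_cons]
    have hstep : stepB pos n (rows, d1, d2, safe) m =
        (PySem.Set.add rows (pg pos m), PySem.Set.add d1 (pg pos m - m),
         PySem.Set.add d2 (pg pos m + m),
         if m ≠ n - 1 ∧ pg pos m ∉ rows ∧ (pg pos m - m) ∉ d1 ∧ (pg pos m + m) ∉ d2
         then safe + 1 else safe) := by
      simp only [stepB, pg]
      rfl
    rw [hstep]
    have hr2 : ∀ x, x ∈ PySem.Set.add rows (pg pos m) ↔ ∃ j, m - 1 < j ∧ j < n ∧ pg pos j = x := by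
      intro x
      rw [PySem.Set.mem_add, hr x]
      constructor
      · rintro (⟨j, h1, h2, h3⟩ | hx)
        · exact ⟨j, by omega, h2, h3⟩
        · exact ⟨m, by omega, hmn', hx.symm⟩
      · rintro ⟨j, h1, h2, h3⟩
        by_cases hj : j = m
        · right; rw [← h3, hj]
        · left; exact ⟨j, by omega, h2, h3⟩
    have hd12 : ∀ x, x ∈ PySem.Set.add d1 (pg pos m - m) ↔ ∃ j, m - 1 < j ∧ j < n ∧ pg pos j - j = x := by
      intro x
      rw [PySem.Set.mem_add, hd1 x]
      constructor
      · rintro (⟨j, h1, h2, h3⟩ | hx)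
        · exact ⟨j, by omega, h2, h3⟩
        · exact ⟨m, by omega, hmn', hx.symm⟩
      · rintro ⟨j, h1, h2, h3⟩
        by_cases hj : j = m
        · right; rw [← h3, hj]
        · left; exact ⟨j, by omega, h2, h3⟩
    have hd22 : ∀ x, x ∈ PySem.Set.add d2 (pg pos m + m) ↔ ∃ j, m - 1 < j ∧ j < n ∧ pg pos j + j = x := by
      intro x
      rw [PySem.Set.mem_add, hd2 x]
      constructor
      · rintro (⟨j, h1, h2, h3⟩ | hx)
        · exact ⟨j, by omega, h2, h3⟩
        · exact ⟨m, by omega, hmn', hx.symm⟩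
      · rintro ⟨j, h1, h2, h3⟩
        by_cases hj : j = m
        · right; rw [← h3, hj]
        · left; exact ⟨j, by omega, h2, h3⟩
    have hsafe2 : (if m ≠ n - 1 ∧ pg pos m ∉ rows ∧ (pg pos m - m) ∉ d1 ∧ (pg pos m + m) ∉ d2
          then safe + 1 else safe) =
        ((PySem.List.pyRange (m - 1 + 1) (n - 1) 1).countP (allOk pos n) : Int) := by
      rw [show m - 1 + 1 = m by omega]
      by_cases hmn : m = n - 1
      · rw [if_neg (fun h => h.1 hmn)]
        rw [PySem.List.pyRange_one_eq_nil (by omega : n - 1 ≤ m)]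
        rw [PySem.List.pyRange_one_eq_nil (by omega : n - 1 ≤ m + 1)] at hsafe
        simpa using hsafe
      · have hcond : (m ≠ n - 1 ∧ pg pos m ∉ rows ∧ (pg pos m - m) ∉ d1 ∧ (pg pos m + m) ∉ d2)
            ↔ allOk pos n m = true := by
          rw [allOk_iff pos n m hmn']
          constructor
          · rintro ⟨-, hrn, hd1n, hd2n⟩ j hj1 hj2
            simp only [okB, decide_eq_true_eq]
            refine ⟨?_, ?_, ?_⟩
            · intro hcon; exact hrn ((hr _).2 ⟨j, hj1, hj2, hcon⟩)
            · intro hcon; exact hd1n ((hd1 _).2 ⟨j, hj1, hj2, by omega⟩)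
            · intro hcon; exact hd2n ((hd2 _).2 ⟨j, hj1, hj2, by omega⟩)
          · intro hall
            refine ⟨hmn, ?_, ?_, ?_⟩
            · intro hmem
              obtain ⟨j, h1, h2, h3⟩ := (hr _).1 hmem
              have := hall j h1 h2
              simp only [okB, decide_eq_true_eq] at this
              exact this.1 h3
            · intro hmem
              obtain ⟨j, h1, h2, h3⟩ := (hd1 _).1 hmem
              have := hall j h1 h2
              simp only [okB, decide_eq_true_eq] at this
              exact this.2.1 (by omega)
            · intro hmem
              obtain ⟨j, h1, h2, h3⟩ := (hd2 _).1 hmem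
              have := hall j h1 h2
              simp only [okB, decide_eq_true_eq] at this
              exact this.2.2 (by omega)
        rw [PySem.List.pyRange_one_cons (by omega : m < n - 1), List.countP_cons]
        by_cases hok : allOk pos n m = true
        · rw [if_pos (hcond.mpr hok), hsafe]
          simp [hok]
        · rw [if_neg (fun h => hok (hcond.mp h)), hsafe]
          simp [hok]
    exact ih (m - 1) _ _ _ _ (by omega) (by omega) (by omega) hr2 hd12 hd22 hsafe2

-- ===== VERDICT (by name: the statement is the Claim_ definition above) =====
theorem queens_max_spec : Claim_equal_queens_max := by
  intro position _
  unfold Spec_queens_max queens_max queens_max_alt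
  have key : (PySem.List.pyRange 0 ((position.length : Int) - 1) 1).foldl
      (fun q i => innerA position (position.length : Int) i q) 0 =
      ((PySem.List.pyRange 0 ((position.length : Int) - 1) 1).countP
        (allOk position (position.length : Int)) : Int) := by
    rw [outerA position (position.length : Int) _ 0
      (by intro i hi; rw [PySem.List.mem_pyRange_one] at hi; exact hi.2)]
    ring
  have hB := loopB position (position.length : Int) ((position.length : Int) - 1 + 1).toNat
      ((position.length : Int) - 1) PySem.Set.empty PySem.Set.empty PySem.Set.empty 0 rfl
      (by omega) (le_refl _)
      (by intro p
          constructor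
          · intro h; simp [PySem.Set.empty] at h
          · rintro ⟨j, h1, h2, -⟩; exact absurd h2 (by omega))
      (by intro p
          constructor
          · intro h; simp [PySem.Set.empty] at h
          · rintro ⟨j, h1, h2, -⟩; exact absurd h2 (by omega))
      (by intro p
          constructor
          · intro h; simp [PySem.Set.empty] at h
          · rintro ⟨j, h1, h2, -⟩; exact absurd h2 (by omega))
      (by rw [PySem.List.pyRange_one_eq_nil (by omega)]; simp)
  simp only []
  rw [key, hB]
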